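-- pv_equiv track=rewrite | github.com/supriya-manna/adversarial-sensitivity | tau.py | getScoreMatrix
-- ===== SOURCE A (Python) =====
-- def getScoreMatrix(a):
--     #Takes a ranking vector (list) a, and returns a score matrix (list of lists) corresponding to it
--
--     #Create an nxn matrix
--     matrix = []
--     for i in range(len(a)):
--         matrix.append([None]*len(a))
--
--     for i in range(len(a)):
--         for j in range(len(a)):
--             if i == j or a[i] == 0 or a[j] == 0:
--                 matrix[i][j] = 0
--             elif a[i] <= a[j]:
--                 matrix[i][j] = 1
--             else:
--                 matrix[i][j] = -1
--
--     return matrix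
-- ===== SOURCE B (Python) =====
-- def getScoreMatrix(a):
--     # Single triangular pass: start from an all-zero matrix and, for each pair
--     # i < j, fill matrix[i][j] and its mirror matrix[j][i] at once.
--     n = len(a)
--     matrix = [[0] * n for _ in range(n)]
--     for i in range(n):
--         for j in range(i + 1, n):
--             if a[i] == 0 or a[j] == 0:
--                 continue
--             if a[i] == a[j]:
--                 matrix[i][j] = 1
--                 matrix[j][i] = 1
--             elif a[i] < a[j]:
--                 matrix[i][j] = 1
--                 matrix[j][i] = -1
--             else:
--                 matrix[i][j] = -1
--                 matrix[j][i] = 1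
--     return matrix
-- ===== Notes on version B (the rewrite author's own statement) =====
-- stated objective: alternative
-- what changed: Replaces the full n*n ordered-pair scan with a single triangular pass over pairs i<j that fills each cell and its mirror at once over a zero-initialized matrix (ties set both cells to 1, zeros leave both 0).
import Mathlib
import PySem

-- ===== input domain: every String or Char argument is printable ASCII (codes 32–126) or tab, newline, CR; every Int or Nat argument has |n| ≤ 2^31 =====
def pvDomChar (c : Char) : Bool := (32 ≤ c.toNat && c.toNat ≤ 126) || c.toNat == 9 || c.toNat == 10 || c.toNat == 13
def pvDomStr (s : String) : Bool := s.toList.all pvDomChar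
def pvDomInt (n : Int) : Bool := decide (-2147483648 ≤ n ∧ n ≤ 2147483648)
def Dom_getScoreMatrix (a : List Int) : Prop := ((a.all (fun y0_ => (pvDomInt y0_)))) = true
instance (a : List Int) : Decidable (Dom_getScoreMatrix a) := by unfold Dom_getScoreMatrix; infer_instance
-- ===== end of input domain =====

-- B replaces A's full n×n ordered-pair scan by one triangular pass over pairs i<j that
-- fills each cell and its mirror at once over a zero-initialized matrix (objective: alternative).

-- ===== PORT A =====
-- A appends rows [None]*n and then overwrites EVERY cell before returning;
-- 0 stands for the never-observed None placeholder.
def getScoreMatrix (a : List Int) : List (List Int) :=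
  let n := a.length
  let matrix := (List.range n).foldl (fun m _ => m ++ [List.replicate n (0 : Int)]) []
  (List.range n).foldl (fun m i =>
    (List.range n).foldl (fun m j =>
      m.set i ((m.getD i []).set j
        (if i = j ∨ a.getD i 0 = 0 ∨ a.getD j 0 = 0 then 0
         else if a.getD i 0 ≤ a.getD j 0 then 1 else -1))) m) matrix

-- ===== PORT B =====
-- range(i+1, n) is List.range' (i+1) (n-(i+1)); the 'continue' branch returns m unchanged.
def getScoreMatrix_alt (a : List Int) : List (List Int) :=
  let n := a.length
  let matrix := List.replicate n (List.replicate n (0 : Int))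
  (List.range n).foldl (fun m i =>
    (List.range' (i + 1) (n - (i + 1))).foldl (fun m j =>
      if a.getD i 0 = 0 ∨ a.getD j 0 = 0 then m
      else if a.getD i 0 = a.getD j 0 then
        let m₁ := m.set i ((m.getD i []).set j 1)
        m₁.set j ((m₁.getD j []).set i 1)
      else if a.getD i 0 < a.getD j 0 then
        let m₁ := m.set i ((m.getD i []).set j 1)
        m₁.set j ((m₁.getD j []).set i (-1))
      else
        let m₁ := m.set i ((m.getD i []).set j (-1))
        m₁.set j ((m₁.getD j []).set i 1)) m) matrix

-- ===== PRECONDITION & SPEC =====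
def Spec_getScoreMatrix (a : List Int) (out : List (List Int)) : Prop := out = getScoreMatrix_alt a
instance (a : List Int) (out : List (List Int)) : Decidable (Spec_getScoreMatrix a out) := by unfold Spec_getScoreMatrix; infer_instance

-- ===== CLAIM (what is proved, stated in full; the proofs are below) =====
def Claim_equal_getScoreMatrix : Prop := ∀ (a : List Int), Dom_getScoreMatrix a → Spec_getScoreMatrix a (getScoreMatrix a)

-- ===== LEMMAS AND PROOFS =====

/-- The value A writes into cell (i, j); the common closed form both ports are reduced to. -/
def pvCell (a : List Int) (i j : Nat) : Int :=
  if i = j ∨ a.getD i 0 = 0 ∨ a.getD j 0 = 0 then 0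
  else if a.getD i 0 ≤ a.getD j 0 then 1 else -1

def pvShape (n : Nat) (m : List (List Int)) : Prop :=
  m.length = n ∧ ∀ r ∈ m, r.length = n

/-- Cell read with a default (both indices always in range where this is used). -/
def pvGet2 (m : List (List Int)) (p q : Nat) : Int := (m.getD p []).getD q 0

-- generic: setting position k of (prefix of k mapped values ++ rest) extends the prefix
theorem pv_set_prefix {α : Type} (f : Nat → α) (k : Nat) (r0 : List α) (h : k < r0.length) :
    ((List.range k).map f ++ r0.drop k).set k (f k) = (List.range (k+1)).map f ++ r0.drop (k+1) := by
  rw [List.set_append_right _ _ (by simp)]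
  simp only [List.length_map, List.length_range, Nat.sub_self]
  rw [List.drop_eq_getElem_cons h, List.set_cons_zero]
  simp [List.range_succ]

theorem pv_rowfold {α : Type} (f : Nat → α) :
    ∀ (k : Nat) (r0 : List α), k ≤ r0.length →
      (List.range k).foldl (fun r j => r.set j (f j)) r0 = (List.range k).map f ++ r0.drop k := by
  intro k
  induction k with
  | zero => intro r0 _; simp
  | succ k ih =>
    intro r0 h
    conv_lhs => rw [List.range_succ]
    rw [List.foldl_append, ih r0 (by omega)]
    simp only [List.foldl_cons, List.foldl_nil]
    exact pv_set_prefix f k r0 (by omega)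

-- A's inner loop only touches row i: it equals setting row i to the folded row
theorem pv_locA (g : Nat → Int) :
    ∀ (js : List Nat) (m : List (List Int)) (i : Nat), i < m.length →
      js.foldl (fun m j => m.set i ((m.getD i []).set j (g j))) m
        = m.set i (js.foldl (fun r j => r.set j (g j)) (m.getD i [])) := by
  intro js
  induction js with
  | nil =>
    intro m i h
    simp only [List.getD]
    rw [List.getElem?_eq_getElem h]
    exact (List.set_getElem_self h).symm
  | cons j js ih =>
    intro m i h
    simp only [List.foldl_cons]
    rw [ih _ i (by simpa using h)]
    have hget : ((m.set i ((m.getD i []).set j (g j))).getD i []) = (m.getD i []).set j (g j) := by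
      simp [List.getD, h]
    rw [hget, List.set_set]

theorem pv_initA (n : Nat) (x : List Int) :
    (List.range n).foldl (fun m _ => m ++ [x]) [] = List.replicate n x := by
  induction n with
  | zero => simp
  | succ n ih => rw [List.range_succ, List.foldl_append]; simp [ih, List.replicate_succ']

/-- A's port computes the closed-form matrix of pvCell values. -/
theorem pv_A_closed (a : List Int) :
    getScoreMatrix a
      = (List.range a.length).map (fun i => (List.range a.length).map (pvCell a i)) := by
  show (List.range a.length).foldl (fun m i =>
      (List.range a.length).foldl (fun m j =>
        m.set i ((m.getD i []).set j
          (if i = j ∨ a.getD i 0 = 0 ∨ a.getD j 0 = 0 then 0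
           else if a.getD i 0 ≤ a.getD j 0 then 1 else -1))) m)
      ((List.range a.length).foldl (fun m _ => m ++ [List.replicate a.length (0 : Int)]) []) = _
  rw [pv_initA]
  set n := a.length with hn
  have main : ∀ k, k ≤ n →
      (List.range k).foldl (fun m i =>
        (List.range n).foldl (fun m j =>
          m.set i ((m.getD i []).set j
            (if i = j ∨ a.getD i 0 = 0 ∨ a.getD j 0 = 0 then 0
             else if a.getD i 0 ≤ a.getD j 0 then 1 else -1))) m)
        (List.replicate n (List.replicate n (0:Int)))
      = (List.range k).map (fun i => (List.range n).map (pvCell a i))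
          ++ (List.replicate n (List.replicate n (0:Int))).drop k := by
    intro k hk
    induction k with
    | zero => simp
    | succ k ih =>
      conv_lhs => rw [List.range_succ]
      rw [List.foldl_append, ih (by omega)]
      set prev := (List.range k).map (fun i => (List.range n).map (pvCell a i))
          ++ (List.replicate n (List.replicate n (0:Int))).drop k with hprev
      have hklt : k < n := by omega
      have hplen : prev.length = n := by simp [hprev]; omega
      have hrow : prev.getD k [] = List.replicate n (0:Int) := by
        have hk' : prev[k]'(by omega) = List.replicate n (0:Int) := by
          simp [hprev, List.getElem_append_right, hklt]
        rw [List.getD_eq_getElem _ _ (by omega), hk']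
      simp only [List.foldl_cons, List.foldl_nil]
      rw [pv_locA _ (List.range n) prev k (by omega)]
      rw [hrow, pv_rowfold _ n (List.replicate n (0:Int)) (by simp)]
      simp only [List.drop_replicate, Nat.sub_self, List.replicate_zero, List.append_nil]
      have hfun : (fun j => if k = j ∨ a.getD k 0 = 0 ∨ a.getD j 0 = 0 then (0:Int)
             else if a.getD k 0 ≤ a.getD j 0 then 1 else -1) = pvCell a k := by
        funext j; simp [pvCell]
      rw [hfun, hprev]
      simpa [List.drop_replicate] using pv_set_prefix (fun i => (List.range n).map (pvCell a i)) k
        (List.replicate n (List.replicate n (0:Int))) (by simpa using hklt)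
  simpa using main n (le_refl n)

-- cell read of a single row/cell set
theorem pv_get2_set {n : Nat} {m : List (List Int)} (hs : pvShape n m)
    {i j : Nat} (hi : i < n) (hj : j < n) (v : Int) (p q : Nat) :
    pvGet2 (m.set i ((m.getD i []).set j v)) p q
      = if p = i ∧ q = j then v else pvGet2 m p q := by
  obtain ⟨hlen, hrows⟩ := hs
  have hrowlen : (m.getD i []).length = n := by
    rw [List.getD_eq_getElem _ _ (by omega)]
    exact hrows _ (List.getElem_mem _)
  by_cases hp : p = i
  · subst hp
    have hri : (m.set p ((m.getD p []).set j v)).getD p [] = (m.getD p []).set j v := by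
      simp [List.getD, show p < m.length by omega]
    simp only [pvGet2, hri]
    by_cases hq : q = j
    · subst hq
      simp only [List.getD] at hrowlen ⊢
      rw [List.getElem?_set_self (by omega)]
      simp
    · simp [List.getD, List.getElem?_set_ne (fun h => hq h.symm), hq]
  · have hro : (m.set i ((m.getD i []).set j v)).getD p [] = m.getD p [] := by
      simp [List.getD, List.getElem?_set_ne (fun h => hp h.symm)]
    simp only [pvGet2, List.getD] at hro ⊢
    simp [hro, hp]

theorem pv_shape_set {n : Nat} {m : List (List Int)} (hs : pvShape n m)
    {i : Nat} (hi : i < n) (j : Nat) (v : Int) :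
    pvShape n (m.set i ((m.getD i []).set j v)) := by
  obtain ⟨hlen, hrows⟩ := hs
  refine ⟨by simp [hlen], ?_⟩
  intro r hr
  rcases List.mem_or_eq_of_mem_set hr with h | h
  · exact hrows _ h
  · subst h
    rw [List.length_set, List.getD_eq_getElem _ _ (by omega)]
    exact hrows _ (List.getElem_mem _)

/-- A same-shape matrix whose cells are the pvCell values IS the closed-form matrix. -/
theorem pv_eq_closed {n : Nat} (a : List Int) {m : List (List Int)} (hs : pvShape n m)
    (h : ∀ p q, p < n → q < n → pvGet2 m p q = pvCell a p q) :
    m = (List.range n).map (fun i => (List.range n).map (pvCell a i)) := by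
  obtain ⟨hlen, hrows⟩ := hs
  apply List.ext_getElem (by simp [hlen])
  intro p h1 h2
  have hpn : p < n := by omega
  apply List.ext_getElem
  · simp [hrows _ (List.getElem_mem _)]
  intro q h3 h4
  have hqn : q < n := by simpa using h4
  have hc := h p q hpn hqn
  have hrl : (m.getD p []).length = n := by
    rw [List.getD_eq_getElem _ _ (by omega)]
    exact hrows _ (List.getElem_mem _)
  simp only [pvGet2, List.getD] at hc
  rw [List.getElem?_eq_getElem h1] at hc
  simp only [Option.getD_some] at hc
  rw [List.getElem?_eq_getElem h3] at hc
  simp only [Option.getD_some] at hc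
  simp [hc]

/-- Pair (p,q) already written after outer rounds < i plus, in round i, inner steps < s. -/
def pvDone (i s p q : Nat) : Bool :=
  decide (p ≠ q ∧ (min p q < i ∨ (min p q = i ∧ max p q < s)))

theorem pvDone_step (i s p q : Nat) (hne1 : ¬(p = i ∧ q = s)) (hne2 : ¬(p = s ∧ q = i)) :
    pvDone i (s+1) p q = pvDone i s p q := by
  simp only [pvDone, decide_eq_decide]
  omega

theorem pv_innerB (a : List Int) (n : Nat) (i : Nat) (hi : i < n) :
    ∀ (t s : Nat) (m : List (List Int)), i + 1 ≤ s → s + t ≤ n → pvShape n m →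
      (∀ p q, p < n → q < n → pvGet2 m p q = if pvDone i s p q then pvCell a p q else 0) →
      pvShape n ((List.range' s t).foldl (fun m j =>
        if a.getD i 0 = 0 ∨ a.getD j 0 = 0 then m
        else if a.getD i 0 = a.getD j 0 then
          let m₁ := m.set i ((m.getD i []).set j 1)
          m₁.set j ((m₁.getD j []).set i 1)
        else if a.getD i 0 < a.getD j 0 then
          let m₁ := m.set i ((m.getD i []).set j 1)
          m₁.set j ((m₁.getD j []).set i (-1))
        else
          let m₁ := m.set i ((m.getD i []).set j (-1))
          m₁.set j ((m₁.getD j []).set i 1)) m) ∧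
      (∀ p q, p < n → q < n →
        pvGet2 ((List.range' s t).foldl (fun m j =>
          if a.getD i 0 = 0 ∨ a.getD j 0 = 0 then m
          else if a.getD i 0 = a.getD j 0 then
            let m₁ := m.set i ((m.getD i []).set j 1)
            m₁.set j ((m₁.getD j []).set i 1)
          else if a.getD i 0 < a.getD j 0 then
            let m₁ := m.set i ((m.getD i []).set j 1)
            m₁.set j ((m₁.getD j []).set i (-1))
          else
            let m₁ := m.set i ((m.getD i []).set j (-1))
            m₁.set j ((m₁.getD j []).set i 1)) m) p q
          = if pvDone i (s + t) p q then pvCell a p q else 0) := by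
  intro t
  induction t with
  | zero =>
    intro s m _ _ h3 h4
    simpa using ⟨h3, h4⟩
  | succ t ih =>
    intro s m h1 h2 h3 h4
    simp only [List.range'_succ, List.foldl_cons]
    have his : i < s := by omega
    have hsn : s < n := by omega
    set m' := (if a.getD i 0 = 0 ∨ a.getD s 0 = 0 then m
        else if a.getD i 0 = a.getD s 0 then
          let m₁ := m.set i ((m.getD i []).set s 1)
          m₁.set s ((m₁.getD s []).set i 1)
        else if a.getD i 0 < a.getD s 0 then
          let m₁ := m.set i ((m.getD i []).set s 1)
          m₁.set s ((m₁.getD s []).set i (-1))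
        else
          let m₁ := m.set i ((m.getD i []).set s (-1))
          m₁.set s ((m₁.getD s []).set i 1)) with hm'
    have hshape' : pvShape n m' := by
      rw [hm']
      split_ifs <;>
        first
          | exact h3
          | exact pv_shape_set (pv_shape_set h3 hi _ _) hsn _ _
    have hGis : pvGet2 m i s = 0 := by
      rw [h4 i s hi hsn]
      have : pvDone i s i s = false := by simp only [pvDone, decide_eq_false_iff_not]; omega
      simp [this]
    have hGsi : pvGet2 m s i = 0 := by
      rw [h4 s i hsn hi]
      have : pvDone i s s i = false := by simp only [pvDone, decide_eq_false_iff_not]; omega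
      simp [this]
    have hDis : pvDone i (s+1) i s = true := by
      simp only [pvDone, decide_eq_true_eq]; omega
    have hDsi : pvDone i (s+1) s i = true := by
      simp only [pvDone, decide_eq_true_eq]; omega
    have hget' : ∀ p q, p < n → q < n →
        pvGet2 m' p q = if pvDone i (s+1) p q then pvCell a p q else 0 := by
      intro p q hp hq
      rw [hm']
      by_cases hz : a.getD i 0 = 0 ∨ a.getD s 0 = 0
      · rw [if_pos hz]
        by_cases hn1 : p = i ∧ q = s
        · obtain ⟨rfl, rfl⟩ := hn1
          rw [hGis, hDis, if_pos rfl]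
          have : pvCell a p q = 0 := by
            simp only [pvCell]
            rw [if_pos (Or.inr hz)]
          omega
        · by_cases hn2 : p = s ∧ q = i
          · obtain ⟨rfl, rfl⟩ := hn2
            rw [hGsi, hDsi, if_pos rfl]
            have : pvCell a p q = 0 := by
              simp only [pvCell]
              rw [if_pos (Or.inr (Or.symm hz))]
            omega
          · rw [pvDone_step i s p q hn1 hn2]
            exact h4 p q hp hq
      · push_neg at hz
        obtain ⟨hzi, hzs⟩ := hz
        have hcis : pvCell a i s = if a.getD i 0 ≤ a.getD s 0 then 1 else -1 := by
          simp only [pvCell]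
          rw [if_neg (by push_neg; exact ⟨by omega, hzi, hzs⟩)]
        have hcsi : pvCell a s i = if a.getD s 0 ≤ a.getD i 0 then 1 else -1 := by
          simp only [pvCell]
          rw [if_neg (by push_neg; exact ⟨by omega, hzs, hzi⟩)]
        rw [if_neg (by push_neg; exact ⟨hzi, hzs⟩)]
        -- common finisher for the three write branches, given the two written values
        have finish : ∀ v1 v2 : Int, v1 = pvCell a i s → v2 = pvCell a s i →
            pvGet2 ((m.set i ((m.getD i []).set s v1)).set s
                (((m.set i ((m.getD i []).set s v1)).getD s []).set i v2)) p q
              = if pvDone i (s+1) p q then pvCell a p q else 0 := by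
          intro v1 v2 hv1 hv2
          have hs1 : pvShape n (m.set i ((m.getD i []).set s v1)) :=
            pv_shape_set h3 hi _ _
          rw [pv_get2_set hs1 hsn hi v2 p q, pv_get2_set h3 hi hsn v1 p q]
          by_cases hn2 : p = s ∧ q = i
          · obtain ⟨rfl, rfl⟩ := hn2
            rw [if_pos (show p = p ∧ q = q from ⟨rfl, rfl⟩), hDsi, if_pos rfl, hv2]
          · rw [if_neg hn2]
            by_cases hn1 : p = i ∧ q = s
            · obtain ⟨rfl, rfl⟩ := hn1
              rw [if_pos (show p = p ∧ q = q from ⟨rfl, rfl⟩), hDis, if_pos rfl, hv1]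
            · rw [if_neg hn1, pvDone_step i s p q hn1 hn2]
              exact h4 p q hp hq
        by_cases heq : a.getD i 0 = a.getD s 0
        · rw [if_pos heq]
          exact finish 1 1 (by rw [hcis, if_pos (by omega)]) (by rw [hcsi, if_pos (by omega)])
        · rw [if_neg heq]
          by_cases hlt : a.getD i 0 < a.getD s 0
          · rw [if_pos hlt]
            exact finish 1 (-1) (by rw [hcis, if_pos (by omega)]) (by rw [hcsi, if_neg (by omega)])
          · rw [if_neg hlt]
            exact finish (-1) 1 (by rw [hcis, if_neg (by omega)]) (by rw [hcsi, if_pos (by omega)])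
    have hres := ih (s+1) m' (by omega) (by omega) hshape' hget'
    have harith : s + (t + 1) = (s + 1) + t := by omega
    rw [harith]
    exact hres

/-- B's port computes the same closed-form matrix of pvCell values. -/
theorem pv_B_closed (a : List Int) :
    getScoreMatrix_alt a
      = (List.range a.length).map (fun i => (List.range a.length).map (pvCell a i)) := by
  show (List.range a.length).foldl (fun m i =>
      (List.range' (i + 1) (a.length - (i + 1))).foldl (fun m j =>
        if a.getD i 0 = 0 ∨ a.getD j 0 = 0 then m
        else if a.getD i 0 = a.getD j 0 then
          let m₁ := m.set i ((m.getD i []).set j 1)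
          m₁.set j ((m₁.getD j []).set i 1)
        else if a.getD i 0 < a.getD j 0 then
          let m₁ := m.set i ((m.getD i []).set j 1)
          m₁.set j ((m₁.getD j []).set i (-1))
        else
          let m₁ := m.set i ((m.getD i []).set j (-1))
          m₁.set j ((m₁.getD j []).set i 1)) m)
      (List.replicate a.length (List.replicate a.length (0 : Int))) = _
  set n := a.length with hn
  have main : ∀ k, k ≤ n →
      pvShape n ((List.range k).foldl (fun m i =>
        (List.range' (i + 1) (n - (i + 1))).foldl (fun m j =>
          if a.getD i 0 = 0 ∨ a.getD j 0 = 0 then m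
          else if a.getD i 0 = a.getD j 0 then
            let m₁ := m.set i ((m.getD i []).set j 1)
            m₁.set j ((m₁.getD j []).set i 1)
          else if a.getD i 0 < a.getD j 0 then
            let m₁ := m.set i ((m.getD i []).set j 1)
            m₁.set j ((m₁.getD j []).set i (-1))
          else
            let m₁ := m.set i ((m.getD i []).set j (-1))
            m₁.set j ((m₁.getD j []).set i 1)) m)
        (List.replicate n (List.replicate n (0 : Int)))) ∧
      (∀ p q, p < n → q < n →
        pvGet2 ((List.range k).foldl (fun m i =>
          (List.range' (i + 1) (n - (i + 1))).foldl (fun m j =>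
            if a.getD i 0 = 0 ∨ a.getD j 0 = 0 then m
            else if a.getD i 0 = a.getD j 0 then
              let m₁ := m.set i ((m.getD i []).set j 1)
              m₁.set j ((m₁.getD j []).set i 1)
            else if a.getD i 0 < a.getD j 0 then
              let m₁ := m.set i ((m.getD i []).set j 1)
              m₁.set j ((m₁.getD j []).set i (-1))
            else
              let m₁ := m.set i ((m.getD i []).set j (-1))
              m₁.set j ((m₁.getD j []).set i 1)) m)
          (List.replicate n (List.replicate n (0 : Int)))) p q
          = if pvDone k 0 p q then pvCell a p q else 0) := by
    intro k hk
    induction k with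
    | zero =>
      constructor
      · exact ⟨by simp, by intro r hr; simp [List.eq_of_mem_replicate hr]⟩
      · intro p q hp hq
        have hD : pvDone 0 0 p q = false := by
          simp only [pvDone, decide_eq_false_iff_not]; omega
        simp only [List.range_zero, List.foldl_nil, hD, Bool.false_eq_true, if_false]
        simp [pvGet2, List.getD, hp, hq]
    | succ k ih =>
      obtain ⟨hS, hG⟩ := ih (by omega)
      rw [List.range_succ, List.foldl_append, List.foldl_cons, List.foldl_nil]
      have hkn : k < n := by omega
      obtain ⟨hS2, hG2⟩ := pv_innerB a n k hkn (n - (k+1)) (k+1) _ (by omega) (by omega) hS (by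
        intro p q hp hq
        rw [hG p q hp hq]
        have hd : pvDone k (k+1) p q = pvDone k 0 p q := by
          simp only [pvDone, decide_eq_decide]; omega
        rw [hd])
      refine ⟨hS2, ?_⟩
      intro p q hp hq
      rw [hG2 p q hp hq]
      have : pvDone k ((k+1) + (n - (k+1))) p q = pvDone (k+1) 0 p q := by
        simp only [pvDone, decide_eq_decide]; omega
      rw [this]
  obtain ⟨hS, hG⟩ := main n le_rfl
  apply pv_eq_closed a hS
  intro p q hp hq
  rw [hG p q hp hq]
  by_cases hpq : p = q
  · subst hpq
    have hD : pvDone n 0 p p = false := by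
      simp only [pvDone, decide_eq_false_iff_not]; omega
    rw [hD]
    simp [pvCell]
  · have hD : pvDone n 0 p q = true := by
      simp only [pvDone, decide_eq_true_eq]; omega
    rw [hD]
    simp

-- ===== VERDICT (by name: the statement is the Claim_ definition above) =====
theorem getScoreMatrix_spec : Claim_equal_getScoreMatrix := by
  intro a _
  unfold Spec_getScoreMatrix
  rw [pv_A_closed, pv_B_closed]
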